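-- pv_equiv track=rewrite | github.com/JMCinJiangSu/AutoReport_v5 | libs/getEvi.py | merge_AHSL
-- ===== SOURCE A (Python) =====
-- from collections import defaultdict
--
-- def merge_AHSL(evi_sum):
--     if not evi_sum:
--         return []
--
--     interpretation_groups = defaultdict(list)
--     for evi in evi_sum:
--         key = evi.get('evi_interpretation', '')
--         interpretation_groups[key].append(evi)
--
--     merged_evi = []
--     for interpretation, items in interpretation_groups.items():
--         if len(items) == 1:
--             merged_evi.append(items[0])
--             continue
--
--         base_item = items[0].copy()
--         regimen_names = [item['regimen_name'] for item in items]
--         base_item['regimen_name'] = "、".join(regimen_names)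
--         merged_evi.append(base_item)
--
--     return merged_evi
-- ===== SOURCE B (Python) =====
-- def merge_AHSL(evi_sum):
--     result = []
--     info = {}  # key -> (index in result, first original item, accumulated names or None)
--     for evi in evi_sum:
--         key = evi.get('evi_interpretation', '')
--         if key not in info:
--             info[key] = (len(result), evi, None)
--             result.append(evi)
--         else:
--             i, first, names = info[key]
--             if names is None:
--                 names = [first['regimen_name']]
--             names = names + [evi['regimen_name']]
--             merged = first.copy()
--             merged['regimen_name'] = "、".join(names)
--             info[key] = (i, first, names)
--             result[i] = merged
--     return result
-- ===== Notes on version B (the rewrite author's own statement) =====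
-- stated objective: alternative
-- what changed: Replaces the two-phase group-then-emit (defaultdict collecting full groups, then a second loop re-reading every group) by a single incremental pass that appends new-key items and patches the already-emitted slot in place with the growing joined regimen_name when a key repeats, fetching names lazily so singletons never touch 'regimen_name'; Pre_ excludes inputs on which A raises KeyError (an item of a repeated-key group missing 'regimen_name'), where B raises the same KeyError.
import Mathlib
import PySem

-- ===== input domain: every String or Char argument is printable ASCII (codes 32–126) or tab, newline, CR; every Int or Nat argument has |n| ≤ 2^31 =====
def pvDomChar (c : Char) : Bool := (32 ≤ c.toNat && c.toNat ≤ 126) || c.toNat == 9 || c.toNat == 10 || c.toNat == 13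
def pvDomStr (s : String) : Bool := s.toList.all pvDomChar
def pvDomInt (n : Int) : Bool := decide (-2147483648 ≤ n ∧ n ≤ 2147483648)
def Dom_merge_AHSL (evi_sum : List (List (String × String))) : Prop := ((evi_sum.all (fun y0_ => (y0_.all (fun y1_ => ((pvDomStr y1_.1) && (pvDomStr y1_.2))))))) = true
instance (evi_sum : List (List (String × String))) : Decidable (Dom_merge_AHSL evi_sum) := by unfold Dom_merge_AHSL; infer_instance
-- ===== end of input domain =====

-- B replaces A's group-then-emit (defaultdict of full groups + second emitting loop)
-- by a single incremental pass that patches the already-emitted slot in place when a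
-- key repeats (objective: alternative decomposition, same cost).

-- shared Python-dict helpers on the assoc-list representation (lookup = first match;
-- item assignment overwrites the existing key in place, else appends — Python dict semantics)
def pyDictGetD (d : List (String × String)) (k dflt : String) : String :=
  match d.find? (fun p => p.1 == k) with
  | some p => p.2
  | none   => dflt

def pyDictSet (d : List (String × String)) (k v : String) : List (String × String) :=
  if d.any (fun p => p.1 == k) then d.map (fun p => if p.1 == k then (k, v) else p)
  else d ++ [(k, v)]

def keyOf (e : List (String × String)) : String := pyDictGetD e "evi_interpretation" ""

-- item['regimen_name']; ported as getD "" — exact whenever the key is present, which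
-- Pre_merge_AHSL guarantees at every place either program evaluates it
def nameOf (e : List (String × String)) : String := pyDictGetD e "regimen_name" ""

-- ===== PORT A =====
def merge_AHSL (evi_sum : List (List (String × String))) : List (List (String × String)) :=
  if evi_sum = [] then []
  else
    -- interpretation_groups = defaultdict(list) filled by the first loop; then the
    -- second loop over its items emits one merged item per group
    (evi_sum.foldl (fun d evi => d.modify (keyOf evi) [] (fun g => g ++ [evi]))
        (PySem.Dict.empty : PySem.Dict String (List (List (String × String))))).items.foldl (fun acc kv =>
      if kv.2.length = 1 then acc ++ [kv.2.headD []]   -- items[0]; groups are never empty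
      else acc ++ [pyDictSet (kv.2.headD []) "regimen_name"
                     (PySem.Str.join "、" (kv.2.map nameOf))]) []

-- ===== PORT B =====
-- one step of B's single pass: state = (result so far, info dict key ↦ (index, first item, names or None))
def bStep (st : List (List (String × String)) × PySem.Dict String (Nat × List (String × String) × Option (List String)))
    (evi : List (String × String)) :
    List (List (String × String)) × PySem.Dict String (Nat × List (String × String) × Option (List String)) :=
  let key := keyOf evi
  match st.2.get? key with
  | none => (st.1 ++ [evi], st.2.insert key (st.1.length, evi, none))
  | some (i, first, onames) =>
      let names := (match onames with | none => [nameOf first] | some ns => ns) ++ [nameOf evi]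
      let merged := pyDictSet first "regimen_name" (PySem.Str.join "、" names)
      (st.1.set i merged, st.2.insert key (i, first, some names))

def merge_AHSL_alt (evi_sum : List (List (String × String))) : List (List (String × String)) :=
  (evi_sum.foldl bStep ([], PySem.Dict.empty)).1

-- ===== PRECONDITION & SPEC =====
-- Pre_ excludes exactly the inputs on which A raises KeyError: some item whose
-- 'evi_interpretation' value occurs at least twice lacks the 'regimen_name' key
-- (B raises the same KeyError there).
def Pre_merge_AHSL (evi_sum : List (List (String × String))) : Prop :=
  ∀ e ∈ evi_sum, 2 ≤ evi_sum.countP (fun e' => keyOf e' == keyOf e) →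
    (e.any (fun p => p.1 == "regimen_name")) = true
instance (evi_sum : List (List (String × String))) : Decidable (Pre_merge_AHSL evi_sum) := by
  unfold Pre_merge_AHSL; infer_instance

def pvWitness_merge_AHSL : (List (List (String × String))) :=
  [[("evi_interpretation", "a"), ("regimen_name", "r1")],
   [("evi_interpretation", "a"), ("regimen_name", "r2")],
   [("x", "y")]]

def Spec_merge_AHSL (evi_sum : List (List (String × String))) (out : List (List (String × String))) : Prop := out = merge_AHSL_alt evi_sum
instance (evi_sum : List (List (String × String))) (out : List (List (String × String))) : Decidable (Spec_merge_AHSL evi_sum out) := by unfold Spec_merge_AHSL; infer_instance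

-- ===== CLAIM (what is proved, stated in full; the proofs are below) =====
def Claim_equal_merge_AHSL : Prop := ∀ (evi_sum : List (List (String × String))), Dom_merge_AHSL evi_sum → Pre_merge_AHSL evi_sum → Spec_merge_AHSL evi_sum (merge_AHSL evi_sum)

-- ===== LEMMAS AND PROOFS =====

-- the common closed form both ports are proved equal to
def keysList (xs : List (List (String × String))) : List String :=
  PySem.Set.ofList (xs.map keyOf)

def groupOf (xs : List (List (String × String))) (k : String) : List (List (String × String)) :=
  xs.filter (fun e => keyOf e == k)

def emitG (items : List (List (String × String))) : List (String × String) :=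
  if items.length = 1 then items.headD []
  else pyDictSet (items.headD []) "regimen_name" (PySem.Str.join "、" (items.map nameOf))

def specF (xs : List (List (String × String))) : List (List (String × String)) :=
  (keysList xs).map (fun k => emitG (groupOf xs k))

-- B's info-dict contents after processing xs
def infoAt (xs : List (List (String × String))) (k : String) :
    Option (Nat × List (String × String) × Option (List String)) :=
  if k ∈ keysList xs then
    some ((keysList xs).idxOf k, (groupOf xs k).headD [],
          if 2 ≤ (groupOf xs k).length then some ((groupOf xs k).map nameOf) else none)
  else none

theorem mem_keysList {xs : List (List (String × String))} {k : String} :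
    k ∈ keysList xs ↔ ∃ e ∈ xs, keyOf e = k := by
  simp [keysList, PySem.Set.mem_ofList]

theorem nodup_keysList (xs : List (List (String × String))) : (keysList xs).Nodup :=
  PySem.Set.nodup_ofList _

theorem groupOf_ne_nil {xs : List (List (String × String))} {k : String}
    (h : k ∈ keysList xs) : groupOf xs k ≠ [] := by
  obtain ⟨e, he, hk⟩ := mem_keysList.1 h
  have : e ∈ groupOf xs k := by
    simp [groupOf, List.mem_filter, he, hk]
  exact List.ne_nil_of_mem this

theorem groupOf_eq_nil {xs : List (List (String × String))} {k : String}
    (h : k ∉ keysList xs) : groupOf xs k = [] := by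
  unfold groupOf
  rw [List.filter_eq_nil_iff]
  intro e he
  simp only [beq_iff_eq]
  intro hk
  exact h (mem_keysList.2 ⟨e, he, hk⟩)

theorem keysList_append (xs : List (List (String × String))) (e : List (String × String)) :
    keysList (xs ++ [e]) = PySem.Set.add (keysList xs) (keyOf e) := by
  simp [keysList, List.map_append, PySem.Set.ofList_append_singleton]

theorem groupOf_append (xs : List (List (String × String))) (e : List (String × String)) (k : String) :
    groupOf (xs ++ [e]) k = groupOf xs k ++ (if keyOf e == k then [e] else []) := by
  simp [groupOf, List.filter_append, List.filter_cons]

theorem length_specF (xs : List (List (String × String))) :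
    (specF xs).length = (keysList xs).length := List.length_map ..

-- generic: mapping g over a Nodup list that differs from f only at k is a set at idxOf k
theorem map_eq_set_of_single_change {α β : Type} [DecidableEq α] {l : List α} {k : α}
    (hnd : l.Nodup) (hk : k ∈ l) (f g : α → β) (hfg : ∀ a ∈ l, a ≠ k → f a = g a) :
    l.map g = (l.map f).set (l.idxOf k) (g k) := by
  have hidx : l.idxOf k < l.length := List.idxOf_lt_length_iff.2 hk
  apply List.ext_getElem
  · simp
  · intro j hj hj'
    have hjl : j < l.length := by simpa using hj
    rw [List.getElem_set]
    by_cases hji : l.idxOf k = j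
    · subst hji
      rw [if_pos rfl]
      simp only [List.getElem_map]
      rw [List.getElem_idxOf hidx]
    · rw [if_neg hji]
      simp only [List.getElem_map]
      have hne : l[j] ≠ k := by
        intro hkj
        apply hji
        have := List.getElem_idxOf (x := k) (xs := l) hidx
        exact (List.Nodup.getElem_inj_iff hnd).1 (this.trans hkj.symm) |>.symm ▸ rfl
      exact (hfg _ (l.getElem_mem hjl) hne).symm

-- the emitting loop of A, as append-map
theorem foldA (l : List (String × List (List (String × String))))
    (acc : List (List (String × String))) :
    l.foldl (fun acc kv =>
      if kv.2.length = 1 then acc ++ [kv.2.headD []]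
      else acc ++ [pyDictSet (kv.2.headD []) "regimen_name"
                     (PySem.Str.join "、" (kv.2.map nameOf))]) acc
    = acc ++ l.map (fun kv => emitG kv.2) := by
  induction l generalizing acc with
  | nil => simp
  | cons kv l ih =>
      rw [List.foldl_cons]
      by_cases h : kv.2.length = 1
      · rw [if_pos h, ih, List.map_cons]
        simp [emitG, h]
      · rw [if_neg h, ih, List.map_cons]
        simp [emitG, h]

-- ===== A equals the closed form =====
theorem merge_AHSL_eq_specF (xs : List (List (String × String))) :
    merge_AHSL xs = specF xs := by
  by_cases hx : xs = []
  · subst hx; simp [merge_AHSL, specF, keysList]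
  · unfold merge_AHSL
    rw [if_neg hx]
    set G : PySem.Dict String (List (List (String × String))) :=
      xs.foldl (fun d evi => d.modify (keyOf evi) [] (fun g => g ++ [evi])) PySem.Dict.empty with hGdef
    have hG : G = (xs.map (fun e => (keyOf e, e))).foldl
        (fun d p => d.modify p.1 [] (fun g => g ++ [p.2])) PySem.Dict.empty := by
      rw [hGdef, List.foldl_map]
    have hkeys : G.keys = keysList xs := by
      rw [hGdef, PySem.Dict.keys_foldl_modify_key]
      rw [PySem.Dict.keys_empty, PySem.Set.update_nil_left, keysList]
    have hnod : G.keys.Nodup := hkeys ▸ nodup_keysList xs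
    have hget : ∀ k, G.getD k [] = groupOf xs k := by
      intro k
      rw [hG, PySem.Dict.getD_foldl_modify_append]
      simp [PySem.Dict.getD_empty, List.filter_map, Function.comp_def, groupOf]
    have hitems : G.items = G.keys.map (fun k => (k, G.getD k [])) :=
      PySem.Dict.items_eq_map_keys G hnod []
    rw [foldA, hitems, List.map_map, List.nil_append, hkeys, specF]
    apply List.map_congr_left
    intro k _
    simp [Function.comp, hget k]

-- ===== B equals the closed form =====
theorem groupOf_append_ne (pre : List (List (String × String))) (e : List (String × String))
    (k : String) (hk : k ≠ keyOf e) : groupOf (pre ++ [e]) k = groupOf pre k := by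
  rw [groupOf_append, if_neg (by simp only [beq_iff_eq]; exact fun h => hk h.symm), List.append_nil]

theorem infoAt_append_ne (pre : List (List (String × String))) (e : List (String × String))
    (k : String) (hk : k ≠ keyOf e) : infoAt (pre ++ [e]) k = infoAt pre k := by
  have hmm : k ∈ keysList (pre ++ [e]) ↔ k ∈ keysList pre := by
    rw [keysList_append, PySem.Set.mem_add]
    simp [hk]
  have hg : groupOf (pre ++ [e]) k = groupOf pre k := groupOf_append_ne pre e k hk
  unfold infoAt
  by_cases hk2 : k ∈ keysList pre
  · have hidx : (keysList (pre ++ [e])).idxOf k = (keysList pre).idxOf k := by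
      rw [keysList_append]
      by_cases hm : keyOf e ∈ keysList pre
      · rw [PySem.Set.add_of_mem hm]
      · rw [PySem.Set.add_of_not_mem hm, List.idxOf_append, if_pos hk2]
    rw [if_pos hk2, if_pos (hmm.2 hk2), hg, hidx]
  · rw [if_neg hk2, if_neg (fun h => hk2 (hmm.1 h))]

theorem bStep_inv (pre : List (List (String × String))) (e : List (String × String))
    (st : List (List (String × String)) × PySem.Dict String (Nat × List (String × String) × Option (List String)))
    (h1 : st.1 = specF pre) (h2 : ∀ k, st.2.get? k = infoAt pre k) :
    (bStep st e).1 = specF (pre ++ [e]) ∧ ∀ k, (bStep st e).2.get? k = infoAt (pre ++ [e]) k := by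
  have hgother : ∀ k, k ≠ keyOf e → groupOf (pre ++ [e]) k = groupOf pre k :=
    fun k hk => groupOf_append_ne pre e k hk
  by_cases hmem : keyOf e ∈ keysList pre
  · -- repeated key: B patches the already-emitted slot in place
    have hne : groupOf pre (keyOf e) ≠ [] := groupOf_ne_nil hmem
    have hpos : 0 < (groupOf pre (keyOf e)).length := List.length_pos_iff.2 hne
    have hget : st.2.get? (keyOf e) = some ((keysList pre).idxOf (keyOf e),
        (groupOf pre (keyOf e)).headD [],
        if 2 ≤ (groupOf pre (keyOf e)).length then some ((groupOf pre (keyOf e)).map nameOf)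
        else none) := by
      rw [h2, infoAt, if_pos hmem]
    have hnames : ((match (if 2 ≤ (groupOf pre (keyOf e)).length
          then some ((groupOf pre (keyOf e)).map nameOf) else none) with
        | none => [nameOf ((groupOf pre (keyOf e)).headD [])]
        | some ns => ns) ++ [nameOf e])
        = (groupOf pre (keyOf e) ++ [e]).map nameOf := by
      by_cases h2g : 2 ≤ (groupOf pre (keyOf e)).length
      · rw [if_pos h2g]; simp
      · rw [if_neg h2g]
        have hl1 : (groupOf pre (keyOf e)).length = 1 := by omega
        obtain ⟨a, ha⟩ := List.length_eq_one_iff.1 hl1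
        rw [ha]; simp
    have hstep : bStep st e = (st.1.set ((keysList pre).idxOf (keyOf e))
        (pyDictSet ((groupOf pre (keyOf e)).headD []) "regimen_name"
          (PySem.Str.join "、" ((groupOf pre (keyOf e) ++ [e]).map nameOf))),
        st.2.insert (keyOf e) ((keysList pre).idxOf (keyOf e),
          (groupOf pre (keyOf e)).headD [],
          some ((groupOf pre (keyOf e) ++ [e]).map nameOf))) := by
      simp only [bStep, hget, hnames]
    have hkeys' : keysList (pre ++ [e]) = keysList pre := by
      rw [keysList_append, PySem.Set.add_of_mem hmem]
    have hgkey : groupOf (pre ++ [e]) (keyOf e) = groupOf pre (keyOf e) ++ [e] := by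
      rw [groupOf_append]; simp
    have hhead : (groupOf pre (keyOf e) ++ [e]).headD [] = (groupOf pre (keyOf e)).headD [] := by
      obtain ⟨a, t, ha⟩ := List.exists_cons_of_ne_nil hne
      rw [ha]; simp
    have hemit : emitG (groupOf pre (keyOf e) ++ [e])
        = pyDictSet ((groupOf pre (keyOf e)).headD []) "regimen_name"
            (PySem.Str.join "、" ((groupOf pre (keyOf e) ++ [e]).map nameOf)) := by
      rw [emitG, if_neg (by simp; omega), hhead]
    constructor
    · have hr : specF (pre ++ [e]) = (specF pre).set ((keysList pre).idxOf (keyOf e))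
          (emitG (groupOf (pre ++ [e]) (keyOf e))) := by
        rw [specF, hkeys',
          map_eq_set_of_single_change (nodup_keysList pre) hmem
            (fun k => emitG (groupOf pre k)) (fun k => emitG (groupOf (pre ++ [e]) k))
            (fun a _ hne2 => by
              show emitG (groupOf pre a) = emitG (groupOf (pre ++ [e]) a)
              rw [hgother a hne2])]
        rfl
      rw [hstep, hr, h1, hgkey, hemit]
    · intro k
      rw [hstep]
      simp only [PySem.Dict.get?_insert]
      by_cases hk : k = keyOf e
      · rw [if_pos hk]
        subst hk
        rw [infoAt, if_pos (by rw [hkeys']; exact hmem), hkeys', hgkey, hhead,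
          if_pos (by simp; omega)]
      · rw [if_neg hk, h2, infoAt_append_ne pre e k hk]
  · -- new key: B appends the item unchanged
    have hget : st.2.get? (keyOf e) = none := by rw [h2, infoAt, if_neg hmem]
    have hstep : bStep st e = (st.1 ++ [e], st.2.insert (keyOf e) (st.1.length, e, none)) := by
      simp only [bStep, hget]
    have hkeys' : keysList (pre ++ [e]) = keysList pre ++ [keyOf e] := by
      rw [keysList_append, PySem.Set.add_of_not_mem hmem]
    have hgkey : groupOf (pre ++ [e]) (keyOf e) = [e] := by
      rw [groupOf_append, groupOf_eq_nil hmem]; simp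
    constructor
    · have hr : specF (pre ++ [e]) = specF pre ++ [e] := by
        rw [specF, hkeys', List.map_append]
        congr 1
        · rw [specF]
          exact List.map_congr_left fun k hk => by
            rw [hgother k (by rintro rfl; exact hmem hk)]
        · simp [hgkey, emitG]
      rw [hstep, hr, h1]
    · intro k
      rw [hstep]
      simp only [PySem.Dict.get?_insert]
      by_cases hk : k = keyOf e
      · rw [if_pos hk]
        subst hk
        rw [infoAt, if_pos (by rw [hkeys']; simp), hgkey]
        have hidx : (keysList (pre ++ [e])).idxOf (keyOf e) = (keysList pre).length := by
          rw [hkeys', List.idxOf_append, if_neg hmem]; simp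
        have hlen : st.1.length = (keysList pre).length := by rw [h1, length_specF]
        rw [hidx, hlen]
        simp
      · rw [if_neg hk, h2, infoAt_append_ne pre e k hk]

theorem bRun (suf pre : List (List (String × String)))
    (st : List (List (String × String)) × PySem.Dict String (Nat × List (String × String) × Option (List String)))
    (h1 : st.1 = specF pre) (h2 : ∀ k, st.2.get? k = infoAt pre k) :
    (suf.foldl bStep st).1 = specF (pre ++ suf) := by
  induction suf generalizing pre st with
  | nil => simpa using h1
  | cons e suf ih =>
      obtain ⟨g1, g2⟩ := bStep_inv pre e st h1 h2
      simpa using ih (pre ++ [e]) (bStep st e) g1 g2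

theorem merge_AHSL_alt_eq_specF (xs : List (List (String × String))) :
    merge_AHSL_alt xs = specF xs := by
  have h := bRun xs [] ([], PySem.Dict.empty) (by simp [specF, keysList]) (by
    intro k; simp [infoAt, keysList, PySem.Dict.get?_empty])
  simpa [merge_AHSL_alt] using h

-- ===== VERDICT (by name: the statement is the Claim_ definition above) =====
theorem merge_AHSL_spec : Claim_equal_merge_AHSL := by
  intro xs _ _
  unfold Spec_merge_AHSL
  rw [merge_AHSL_eq_specF, merge_AHSL_alt_eq_specF]
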